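-- pv_equiv track=rewrite | github.com/keenanj-analytics/people-analytics-data-infrastructure | scripts/data_generation/08_complete_raw_job_history.py | _level_path
-- ===== SOURCE A (Python) =====
-- LEVEL_ORDER = ["IC1", "IC2", "IC3", "IC4", "IC5", "M1", "M2", "M3", "M4", "M5"]
--
-- LEVEL_INDEX = {level: i for i, level in enumerate(LEVEL_ORDER)}
--
-- def _level_path(starting_level: str, ending_level: str) -> list[tuple[str, str]]:
--     """Return a list of (old, new) one-step level transitions from start to end.
--
--     For IC->IC moves: walks one level at a time (IC2 -> IC3 -> IC4).
--     For IC->M moves: collapsed to a single jump (IC3 -> M1, IC4 -> M1)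
--     per spec narrative; does not walk through intermediate IC levels.
--     For M->M moves: single steps (M1 -> M2).
--     """
--     if starting_level == ending_level:
--         return []
--
--     start_idx = LEVEL_INDEX[starting_level]
--     end_idx = LEVEL_INDEX[ending_level]
--     if end_idx <= start_idx:
--         return []
--
--     transitions: list[tuple[str, str]] = []
--     current = starting_level
--
--     # IC -> M jump (single-event collapse).
--     if start_idx <= LEVEL_INDEX["IC5"] and end_idx >= LEVEL_INDEX["M1"]:
--         transitions.append((current, "M1"))
--         current = "M1"
--     else:
--         # IC -> IC walk, one level per event.
--         while LEVEL_INDEX[current] < end_idx and current != ending_level: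
--             next_level = LEVEL_ORDER[LEVEL_INDEX[current] + 1]
--             transitions.append((current, next_level))
--             current = next_level
--
--     # Manager-track tail: M1 -> M2, M2 -> M3, ...
--     while LEVEL_INDEX[current] < end_idx:
--         next_level = LEVEL_ORDER[LEVEL_INDEX[current] + 1]
--         transitions.append((current, next_level))
--         current = next_level
--
--     return transitions
-- ===== SOURCE B (Python) =====
-- LEVEL_ORDER = ["IC1", "IC2", "IC3", "IC4", "IC5", "M1", "M2", "M3", "M4", "M5"]
--
-- LEVEL_INDEX = {level: i for i, level in enumerate(LEVEL_ORDER)}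
--
-- def _level_path(starting_level: str, ending_level: str) -> list[tuple[str, str]]:
--     """Recurse back-to-front from the ending level: each call computes the
--     predecessor of the current level (collapsing to the starting level at the
--     IC->M boundary) and prepends the rest of the path recursively."""
--     if starting_level == ending_level:
--         return []
--     if LEVEL_INDEX[ending_level] <= LEVEL_INDEX[starting_level]:
--         return []
--
--     def back(level: str) -> list[tuple[str, str]]:
--         if level == starting_level:
--             return []
--         if level == "M1" and LEVEL_INDEX[starting_level] <= LEVEL_INDEX["IC5"]:
--             prev = starting_level
--         else:
--             prev = LEVEL_ORDER[LEVEL_INDEX[level] - 1]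
--         return back(prev) + [(prev, level)]
--
--     return back(ending_level)
-- ===== Notes on version B (the rewrite author's own statement) =====
-- stated objective: alternative
-- what changed: Replaces A's two forward while-loops over a mutable 'current' with a back-to-front recursion from the ending level that computes each level's predecessor (collapsing to the starting level at the IC->M boundary) and builds the path by prepending.
import Mathlib
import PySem

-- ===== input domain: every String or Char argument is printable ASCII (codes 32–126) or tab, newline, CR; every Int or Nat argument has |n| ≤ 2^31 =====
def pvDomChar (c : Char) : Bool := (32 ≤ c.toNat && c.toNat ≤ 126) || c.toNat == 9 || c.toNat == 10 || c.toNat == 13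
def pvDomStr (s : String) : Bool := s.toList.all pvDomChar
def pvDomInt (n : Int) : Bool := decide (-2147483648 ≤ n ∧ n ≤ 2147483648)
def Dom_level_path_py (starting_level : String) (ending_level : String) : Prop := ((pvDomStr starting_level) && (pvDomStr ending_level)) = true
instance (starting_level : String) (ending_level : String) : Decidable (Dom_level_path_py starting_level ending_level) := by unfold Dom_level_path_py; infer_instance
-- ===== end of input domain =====

-- ===== PORT A =====
-- Port of A. Return-value equivalence only; no mutation involved. The while-loops
-- are ported with fuel = LEVEL_ORDER.length, enough for every in-range input
-- (inside Pre_ the walk is at most 9 steps); dict/list lookups use getD defaults,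
-- never taken inside Pre_.
def LEVEL_ORDER : List String := ["IC1", "IC2", "IC3", "IC4", "IC5", "M1", "M2", "M3", "M4", "M5"]

def LEVEL_INDEX : PySem.Dict String Int :=
  (PySem.List.enumerate LEVEL_ORDER).foldl (fun d p => d.insert p.2 p.1) PySem.Dict.empty

-- first while loop: 'while LEVEL_INDEX[current] < end_idx and current != ending_level'
def pvWalkIC : Nat → String → String → Int → List (String × String) → List (String × String) × String
  | 0, current, _, _, acc => (acc, current)
  | fuel + 1, current, ending_level, end_idx, acc =>
    if LEVEL_INDEX.getD current 0 < end_idx ∧ current ≠ ending_level then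
      let next_level := (PySem.List.pyGet? LEVEL_ORDER (LEVEL_INDEX.getD current 0 + 1)).getD ""
      pvWalkIC fuel next_level ending_level end_idx (acc ++ [(current, next_level)])
    else (acc, current)

-- second while loop: 'while LEVEL_INDEX[current] < end_idx'
def pvWalkM : Nat → String → Int → List (String × String) → List (String × String)
  | 0, _, _, acc => acc
  | fuel + 1, current, end_idx, acc =>
    if LEVEL_INDEX.getD current 0 < end_idx then
      let next_level := (PySem.List.pyGet? LEVEL_ORDER (LEVEL_INDEX.getD current 0 + 1)).getD ""
      pvWalkM fuel next_level end_idx (acc ++ [(current, next_level)])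
    else acc

def level_path_py (starting_level : String) (ending_level : String) : List (String × String) :=
  if starting_level = ending_level then []
  else
    let start_idx := LEVEL_INDEX.getD starting_level 0
    let end_idx := LEVEL_INDEX.getD ending_level 0
    if end_idx ≤ start_idx then []
    else
      let (transitions, current) :=
        if start_idx ≤ LEVEL_INDEX.getD "IC5" 0 ∧ end_idx ≥ LEVEL_INDEX.getD "M1" 0 then
          ([(starting_level, "M1")], "M1")
        else
          pvWalkIC LEVEL_ORDER.length starting_level ending_level end_idx []
      pvWalkM LEVEL_ORDER.length current end_idx transitions

-- ===== PORT B =====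
-- B's back-to-front recursion 'back' is ported with fuel = LEVEL_ORDER.length
-- (inside Pre_ it needs at most 9 recursive calls); lookups use getD defaults,
-- never taken inside Pre_.
def pvBack : Nat → String → String → List (String × String)
  | 0, _, _ => []
  | fuel + 1, starting_level, level =>
    if level = starting_level then []
    else
      let prev :=
        if level = "M1" ∧ LEVEL_INDEX.getD starting_level 0 ≤ LEVEL_INDEX.getD "IC5" 0 then
          starting_level
        else
          (PySem.List.pyGet? LEVEL_ORDER (LEVEL_INDEX.getD level 0 - 1)).getD ""
      pvBack fuel starting_level prev ++ [(prev, level)]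

def level_path_py_alt (starting_level : String) (ending_level : String) : List (String × String) :=
  if starting_level = ending_level then []
  else if LEVEL_INDEX.getD ending_level 0 ≤ LEVEL_INDEX.getD starting_level 0 then []
  else pvBack LEVEL_ORDER.length starting_level ending_level

-- ===== PRECONDITION & SPEC =====
-- Pre_ excludes exactly the inputs on which A raises KeyError: unequal levels where
-- either level is not a member of LEVEL_ORDER.
def Pre_level_path_py (starting_level : String) (ending_level : String) : Prop :=
  starting_level = ending_level ∨ (starting_level ∈ LEVEL_ORDER ∧ ending_level ∈ LEVEL_ORDER)
instance (starting_level : String) (ending_level : String) : Decidable (Pre_level_path_py starting_level ending_level) := by unfold Pre_level_path_py; infer_instance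
def pvWitness_level_path_py : String × String := ("IC2", "M3")
def Spec_level_path_py (starting_level : String) (ending_level : String) (out : List (String × String)) : Prop := out = level_path_py_alt starting_level ending_level
instance (starting_level : String) (ending_level : String) (out : List (String × String)) : Decidable (Spec_level_path_py starting_level ending_level out) := by unfold Spec_level_path_py; infer_instance

-- ===== CLAIM (what is proved, stated in full; the proofs are below) =====
def Claim_equal_level_path_py : Prop := ∀ (starting_level : String) (ending_level : String), Dom_level_path_py starting_level ending_level → Pre_level_path_py starting_level ending_level → Spec_level_path_py starting_level ending_level (level_path_py starting_level ending_level)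

-- ===== LEMMAS AND PROOFS =====

-- ===== VERDICT (by name: the statement is the Claim_ definition above) =====
theorem level_path_py_spec : Claim_equal_level_path_py := by
  intro s e _ hpre
  unfold Spec_level_path_py
  rcases hpre with heq | ⟨hs, he⟩
  · subst heq; simp [level_path_py, level_path_py_alt]
  · fin_cases hs <;> fin_cases he <;> decide
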